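-- pv_equiv track=rewrite | github.com/khmute/Braille_OCR | L5_FeedbackGenerator/feedback_gen.py | levenshtein_distance_with_path
-- ===== SOURCE A (Python) =====
-- def levenshtein_distance_with_path(str1, str2):
--     len1, len2 = len(str1), len(str2)
--
--     # 초기화: 2차원 DP 테이블 및 경로 테이블 생성
--     dp = [[0] * (len2 + 1) for _ in range(len1 + 1)]
--     path = [[[] for _ in range(len2 + 1)] for _ in range(len1 + 1)]
--
--     # 첫 번째 문자열에 대한 초기값 설정 (삽입 작업)
--     for i in range(1, len1 + 1):
--         dp[i][0] = i
--         path[i][0] = path[i-1][0] + [f"Delete '{str1[i-1]}' at position {i-1}"]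
--
--     # 두 번째 문자열에 대한 초기값 설정 (삽입 작업)
--     for j in range(1, len2 + 1):
--         dp[0][j] = j
--         path[0][j] = path[0][j-1] + [f"Insert '{str2[j-1]}' at position {j-1}"]
--
--     # DP 테이블 및 경로 테이블 채우기
--     for i in range(1, len1 + 1):
--         for j in range(1, len2 + 1):
--             if str1[i - 1] == str2[j - 1]:
--                 dp[i][j] = dp[i - 1][j - 1]  # 문자가 같으면 비용 없이 대체
--                 path[i][j] = path[i - 1][j - 1]  # 경로 유지
--             else:
--                 # 삭제, 삽입, 대체 중 최소 비용 선택
--                 delete_cost = dp[i - 1][j] + 1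
--                 insert_cost = dp[i][j - 1] + 1
--                 replace_cost = dp[i - 1][j - 1] + 1
--
--                 min_cost = min(delete_cost, insert_cost, replace_cost)
--                 dp[i][j] = min_cost
--
--                 # 경로 추적
--                 if min_cost == delete_cost:
--                     path[i][j] = path[i - 1][j] + [f"Delete '{str1[i-1]}' at position {i-1}"]
--                 elif min_cost == insert_cost:
--                     path[i][j] = path[i][j - 1] + [f"Insert '{str2[j-1]}' at position {j-1}"]
--                 else:
--                     path[i][j] = path[i - 1][j - 1] + [f"Replace '{str1[i-1]}' with '{str2[j-1]}' at position {i-1}"]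
--
--     return dp[len1][len2], path[len1][len2]
-- ===== SOURCE B (Python) =====
-- def levenshtein_distance_with_path(str1, str2):
--     n, m = len(str1), len(str2)
--     # numeric DP table only (no path copies)
--     dp = [list(range(m + 1))]
--     for i in range(1, n + 1):
--         prev = dp[i - 1]
--         cur = [i]
--         for j in range(1, m + 1):
--             if str1[i - 1] == str2[j - 1]:
--                 cur.append(prev[j - 1])
--             else:
--                 cur.append(1 + min(prev[j], cur[j - 1], prev[j - 1]))
--         dp.append(cur)
--     # single backtrack reconstructing the operations with A's tie-break order
--     ops = []
--     i, j = n, m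
--     while i > 0 or j > 0:
--         if i > 0 and j > 0 and str1[i - 1] == str2[j - 1]:
--             i -= 1
--             j -= 1
--         elif i > 0 and dp[i][j] == dp[i - 1][j] + 1:
--             ops.append(f"Delete '{str1[i - 1]}' at position {i - 1}")
--             i -= 1
--         elif j > 0 and dp[i][j] == dp[i][j - 1] + 1:
--             ops.append(f"Insert '{str2[j - 1]}' at position {j - 1}")
--             j -= 1
--         else:
--             ops.append(f"Replace '{str1[i - 1]}' with '{str2[j - 1]}' at position {i - 1}")
--             i -= 1
--             j -= 1
--     ops.reverse()
--     return dp[n][m], ops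
-- ===== Notes on version B (the rewrite author's own statement) =====
-- stated objective: faster
-- what changed: A copies whole operation-path lists into every DP cell (O(n*m*(n+m))); B fills a numeric DP table only and reconstructs the operation list by a single backtrack that uses A's tie-break order (delete, then insert, then replace).
import Mathlib
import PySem

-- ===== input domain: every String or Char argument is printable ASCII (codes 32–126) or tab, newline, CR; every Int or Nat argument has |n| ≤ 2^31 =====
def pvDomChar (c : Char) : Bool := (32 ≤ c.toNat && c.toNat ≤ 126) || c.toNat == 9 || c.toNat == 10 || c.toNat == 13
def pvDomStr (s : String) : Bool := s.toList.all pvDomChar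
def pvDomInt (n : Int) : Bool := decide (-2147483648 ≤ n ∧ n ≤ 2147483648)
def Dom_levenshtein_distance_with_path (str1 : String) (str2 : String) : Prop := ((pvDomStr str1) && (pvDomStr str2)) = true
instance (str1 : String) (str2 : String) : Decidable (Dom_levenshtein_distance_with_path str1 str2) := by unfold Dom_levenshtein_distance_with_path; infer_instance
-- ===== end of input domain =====

-- B replaces A's per-cell copying of whole operation lists by a numeric DP table plus a
-- single backtrack with A's tie-break order (objective: faster).

-- message helpers shared by both ports (each mirrors the same Python f-string)
def pvDel (c : Char) (p : Nat) : String :=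
  "Delete '" ++ String.ofList [c] ++ "' at position " ++ PySem.Int.toStr (p : Int)
def pvIns (c : Char) (p : Nat) : String :=
  "Insert '" ++ String.ofList [c] ++ "' at position " ++ PySem.Int.toStr (p : Int)
def pvRep (a b : Char) (p : Nat) : String :=
  "Replace '" ++ String.ofList [a] ++ "' with '" ++ String.ofList [b] ++ "' at position " ++ PySem.Int.toStr (p : Int)

-- ===== PORT A =====
-- the body of A's inner loop: one (dp, path) cell from the three neighbour cells,
-- with exactly the Python's branch order (match / delete / insert / replace)
def pvCellA (ch c : Char) (ip k : Nat) (diag left pj : Int × List String) : Int × List String :=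
  if ch = c then diag
  else if min (pj.1 + 1) (min (left.1 + 1) (diag.1 + 1)) = pj.1 + 1 then
    (min (pj.1 + 1) (min (left.1 + 1) (diag.1 + 1)), pj.2 ++ [pvDel ch ip])
  else if min (pj.1 + 1) (min (left.1 + 1) (diag.1 + 1)) = left.1 + 1 then
    (min (pj.1 + 1) (min (left.1 + 1) (diag.1 + 1)), left.2 ++ [pvIns c k])
  else (min (pj.1 + 1) (min (left.1 + 1) (diag.1 + 1)), diag.2 ++ [pvRep ch c ip])

-- row 0: dp[0][j] = j, path[0][j] = path[0][j-1] + [Insert]; k is the 0-based index of c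
def pvInitRowA (c2rest : List Char) (k : Nat) (pp : List String) : List (Int × List String) :=
  match c2rest with
  | [] => []
  | c :: rest =>
      let p := pp ++ [pvIns c k]
      ((k : Int) + 1, p) :: pvInitRowA rest (k + 1) p

-- inner loop over j (columns k+1, k+2, …) of row ip+1; diag = cell (ip, k), left = cell (ip+1, k),
-- prev = cells (ip, k+1 …)
def pvInnerA (ch : Char) (ip : Nat) (diag left : Int × List String)
    (prev : List (Int × List String)) (c2rest : List Char) (k : Nat) : List (Int × List String) :=
  match prev, c2rest with
  | pj :: ptail, c :: ctail =>
      let cell := pvCellA ch c ip k diag left pj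
      cell :: pvInnerA ch ip pj cell ptail ctail (k + 1)
  | _, _ => []

-- outer loop over i; prev is row i0, the new row i0+1 starts with dp[i][0] = i
def pvOuterA (prev : List (Int × List String)) (c1rest c2 : List Char) (i0 : Nat) :
    List (Int × List String) :=
  match c1rest with
  | [] => prev
  | ch :: rest =>
      let h := prev.headD (0, [])
      let col0 : Int × List String := ((i0 : Int) + 1, h.2 ++ [pvDel ch i0])
      let row := col0 :: pvInnerA ch i0 h col0 prev.tail c2 0
      pvOuterA row rest c2 (i0 + 1)

def levenshtein_distance_with_path (str1 : String) (str2 : String) : Int × List String :=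
  let c1 := str1.toList
  let c2 := str2.toList
  let row0 := ((0 : Int), ([] : List String)) :: pvInitRowA c2 0 []
  (pvOuterA row0 c1 c2 0).getLastD (0, [])

-- ===== PORT B =====
-- numeric inner loop: cur[j] from prev[j] (pj), cur[j-1] (left), prev[j-1] (diag)
def pvRowB (ch : Char) (diag left : Int) (prev : List Int) (c2rest : List Char) : List Int :=
  match prev, c2rest with
  | pj :: ptail, c :: ctail =>
      let cell := if ch = c then diag else 1 + min pj (min left diag)
      cell :: pvRowB ch pj cell ptail ctail
  | _, _ => []

def pvRowsB (prev : List Int) (c1rest c2 : List Char) (i0 : Nat) : List (List Int) :=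
  match c1rest with
  | [] => []
  | ch :: rest =>
      let cur := ((i0 : Int) + 1) :: pvRowB ch (prev.headD 0) ((i0 : Int) + 1) prev.tail c2
      cur :: pvRowsB cur rest c2 (i0 + 1)

-- single backtrack, operations produced in backtrack order (reversed by the caller),
-- same tie-break order as A: match, then delete, then insert, then replace
def pvBackB (c1 c2 : List Char) (dp : List (List Int)) (i j : Nat) : List String :=
  if i = 0 ∧ j = 0 then []
  else if h2 : 0 < i ∧ 0 < j ∧ c1.getD (i - 1) ' ' = c2.getD (j - 1) ' ' then
    pvBackB c1 c2 dp (i - 1) (j - 1)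
  else if h3 : 0 < i ∧ (dp.getD i []).getD j 0 = (dp.getD (i - 1) []).getD j 0 + 1 then
    pvDel (c1.getD (i - 1) ' ') (i - 1) :: pvBackB c1 c2 dp (i - 1) j
  else if h4 : 0 < j ∧ (dp.getD i []).getD j 0 = (dp.getD i []).getD (j - 1) 0 + 1 then
    pvIns (c2.getD (j - 1) ' ') (j - 1) :: pvBackB c1 c2 dp i (j - 1)
  else
    pvRep (c1.getD (i - 1) ' ') (c2.getD (j - 1) ' ') (i - 1) :: pvBackB c1 c2 dp (i - 1) (j - 1)
termination_by i + j
decreasing_by all_goals omega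

def levenshtein_distance_with_path_alt (str1 : String) (str2 : String) : Int × List String :=
  let c1 := str1.toList
  let c2 := str2.toList
  let row0 := (List.range (c2.length + 1)).map (fun k : Nat => (k : Int))
  let dp := row0 :: pvRowsB row0 c1 c2 0
  ((dp.getD c1.length []).getD c2.length 0, (pvBackB c1 c2 dp c1.length c2.length).reverse)

-- ===== PRECONDITION & SPEC =====
def Spec_levenshtein_distance_with_path (str1 : String) (str2 : String) (out : Int × List String) : Prop := out = levenshtein_distance_with_path_alt str1 str2
instance (str1 : String) (str2 : String) (out : Int × List String) : Decidable (Spec_levenshtein_distance_with_path str1 str2 out) := by unfold Spec_levenshtein_distance_with_path; infer_instance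

-- ===== CLAIM (what is proved, stated in full; the proofs are below) =====
def Claim_equal_levenshtein_distance_with_path : Prop := ∀ (str1 : String) (str2 : String), Dom_levenshtein_distance_with_path str1 str2 → Spec_levenshtein_distance_with_path str1 str2 (levenshtein_distance_with_path str1 str2)

-- ===== LEMMAS AND PROOFS =====

-- the mathematical cell (distance, path) both programs compute
def pvCell (c1 c2 : List Char) : Nat → Nat → Int × List String
  | 0, 0 => (0, [])
  | i + 1, 0 =>
      ((i : Int) + 1, (pvCell c1 c2 i 0).2 ++ [pvDel (c1.getD i ' ') i])
  | 0, j + 1 =>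
      ((j : Int) + 1, (pvCell c1 c2 0 j).2 ++ [pvIns (c2.getD j ' ') j])
  | i + 1, j + 1 =>
      pvCellA (c1.getD i ' ') (c2.getD j ' ') i j
        (pvCell c1 c2 i j) (pvCell c1 c2 (i + 1) j) (pvCell c1 c2 i (j + 1))
termination_by i j => (i, j)

lemma pvCell_zero_fst (c1 c2 : List Char) (j : Nat) : (pvCell c1 c2 0 j).1 = (j : Int) := by
  cases j <;> simp [pvCell]

lemma pvCell_fst_zero (c1 c2 : List Char) (i : Nat) : (pvCell c1 c2 i 0).1 = (i : Int) := by
  cases i <;> simp [pvCell]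

lemma pvCellA_fst (ch c : Char) (ip k : Nat) (diag left pj : Int × List String) :
    (pvCellA ch c ip k diag left pj).1 =
      if ch = c then diag.1 else min (pj.1 + 1) (min (left.1 + 1) (diag.1 + 1)) := by
  unfold pvCellA
  split_ifs <;> rfl

lemma pvDropZero {α : Type} (l : List α) : l = List.drop 0 l := rfl

lemma drop_head_getD (c2 : List Char) (k : Nat) (c : Char) (rest : List Char)
    (h : c2.drop k = c :: rest) : c2.getD k ' ' = c ∧ c2.drop (k + 1) = rest := by
  have h1 : c2[k]? = some c := by
    have := (List.getElem?_drop (xs := c2) (i := k) (j := 0)).symm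
    simp [h] at this; simpa using this
  constructor
  · simp [List.getD, h1]
  · have : c2.drop (k + 1) = (c2.drop k).drop 1 := by rw [List.drop_drop]
    simp [this, h]

lemma pvInitRowA_spec (c1 c2 : List Char) : ∀ (c2rest : List Char) (k : Nat),
    c2rest = c2.drop k →
    pvInitRowA c2rest k (pvCell c1 c2 0 k).2
      = (List.range' (k + 1) c2rest.length).map (pvCell c1 c2 0) := by
  intro c2rest
  induction c2rest with
  | nil => intro k h; simp [pvInitRowA]
  | cons c rest ih =>
    intro k h
    obtain ⟨hc, hrest⟩ := drop_head_getD c2 k c rest h.symm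
    subst hc
    simp only [List.length_cons, List.range'_succ, List.map_cons]
    have hp : (pvCell c1 c2 0 k).2 ++ [pvIns (c2.getD k ' ') k] = (pvCell c1 c2 0 (k + 1)).2 := by
      rw [pvCell]
    simp only [pvInitRowA]
    rw [hp]
    congr 1
    · rw [pvCell]
    · exact ih (k + 1) hrest.symm

lemma pvInnerA_spec (c1 c2 : List Char) (ip : Nat) : ∀ (c2rest : List Char) (k : Nat)
    (prev : List (Int × List String)),
    c2rest = c2.drop k →
    prev = (List.range' (k + 1) c2rest.length).map (pvCell c1 c2 ip) →
    pvInnerA (c1.getD ip ' ') ip (pvCell c1 c2 ip k) (pvCell c1 c2 (ip + 1) k) prev c2rest k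
      = (List.range' (k + 1) c2rest.length).map (pvCell c1 c2 (ip + 1)) := by
  intro c2rest
  induction c2rest with
  | nil =>
    intro k prev h hp
    simp at hp; subst hp; simp [pvInnerA]
  | cons c rest ih =>
    intro k prev h hp
    obtain ⟨hc, hrest⟩ := drop_head_getD c2 k c rest h.symm
    subst hc
    simp only [List.length_cons, List.range'_succ, List.map_cons] at hp ⊢
    subst hp
    have hcell : pvCell c1 c2 (ip + 1) (k + 1)
        = pvCellA (c1.getD ip ' ') (c2.getD k ' ') ip k
            (pvCell c1 c2 ip k) (pvCell c1 c2 (ip + 1) k) (pvCell c1 c2 ip (k + 1)) := by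
      rw [pvCell]
    simp only [pvInnerA]
    rw [← hcell]
    congr 1
    exact ih (k + 1) _ hrest.symm rfl

lemma pvOuterA_spec (c1 c2 : List Char) : ∀ (c1rest : List Char) (i0 : Nat)
    (prev : List (Int × List String)),
    c1rest = c1.drop i0 →
    prev = (List.range (c2.length + 1)).map (pvCell c1 c2 i0) →
    pvOuterA prev c1rest c2 i0
      = (List.range (c2.length + 1)).map (pvCell c1 c2 (i0 + c1rest.length)) := by
  intro c1rest
  induction c1rest with
  | nil => intro i0 prev h hp; simp [pvOuterA, hp]
  | cons ch rest ih =>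
    intro i0 prev h hp
    obtain ⟨hc, hrest⟩ := drop_head_getD c1 i0 ch rest h.symm
    subst hc
    have hr : List.range (c2.length + 1) = 0 :: List.range' 1 c2.length := by
      rw [List.range_eq_range', List.range'_succ]
    rw [hr, List.map_cons] at hp
    subst hp
    simp only [pvOuterA, List.headD_cons, List.tail_cons]
    have hcol0 : ((i0 : Int) + 1, (pvCell c1 c2 i0 0).2 ++ [pvDel (c1.getD i0 ' ') i0])
        = pvCell c1 c2 (i0 + 1) 0 := by
      rw [pvCell]
    rw [hcol0,
      pvInnerA_spec c1 c2 i0 c2 0 _ (pvDropZero c2) rfl]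
    have := ih (i0 + 1) (pvCell c1 c2 (i0 + 1) 0 :: (List.range' 1 c2.length).map (pvCell c1 c2 (i0 + 1)))
      hrest.symm (by rw [hr, List.map_cons])
    rw [this]
    simp only [List.length_cons]
    rw [show i0 + (rest.length + 1) = i0 + 1 + rest.length from by omega]

lemma pvRowB_spec (c1 c2 : List Char) (ip : Nat) : ∀ (c2rest : List Char) (k : Nat)
    (prev : List Int),
    c2rest = c2.drop k →
    prev = (List.range' (k + 1) c2rest.length).map (fun j => (pvCell c1 c2 ip j).1) →
    pvRowB (c1.getD ip ' ') (pvCell c1 c2 ip k).1 (pvCell c1 c2 (ip + 1) k).1 prev c2rest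
      = (List.range' (k + 1) c2rest.length).map (fun j => (pvCell c1 c2 (ip + 1) j).1) := by
  intro c2rest
  induction c2rest with
  | nil =>
    intro k prev h hp
    simp at hp; subst hp; simp [pvRowB]
  | cons c rest ih =>
    intro k prev h hp
    obtain ⟨hc, hrest⟩ := drop_head_getD c2 k c rest h.symm
    subst hc
    simp only [List.length_cons, List.range'_succ, List.map_cons] at hp ⊢
    subst hp
    have hcell : (if c1.getD ip ' ' = c2.getD k ' ' then (pvCell c1 c2 ip k).1
          else 1 + min (pvCell c1 c2 ip (k + 1)).1
            (min (pvCell c1 c2 (ip + 1) k).1 (pvCell c1 c2 ip k).1))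
        = (pvCell c1 c2 (ip + 1) (k + 1)).1 := by
      rw [pvCell, pvCellA_fst]
      split_ifs with h1
      · rfl
      · omega
    simp only [pvRowB]
    rw [hcell]
    congr 1
    exact ih (k + 1) _ hrest.symm rfl

lemma pvRowsB_spec (c1 c2 : List Char) : ∀ (c1rest : List Char) (i0 : Nat) (prev : List Int),
    c1rest = c1.drop i0 →
    prev = (List.range (c2.length + 1)).map (fun j => (pvCell c1 c2 i0 j).1) →
    pvRowsB prev c1rest c2 i0
      = (List.range' (i0 + 1) c1rest.length).map
          (fun i => (List.range (c2.length + 1)).map (fun j => (pvCell c1 c2 i j).1)) := by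
  intro c1rest
  induction c1rest with
  | nil => intro i0 prev h hp; simp [pvRowsB]
  | cons ch rest ih =>
    intro i0 prev h hp
    obtain ⟨hc, hrest⟩ := drop_head_getD c1 i0 ch rest h.symm
    subst hc
    have hr : List.range (c2.length + 1) = 0 :: List.range' 1 c2.length := by
      rw [List.range_eq_range', List.range'_succ]
    rw [hr, List.map_cons] at hp
    subst hp
    simp only [pvRowsB, List.headD_cons, List.tail_cons, List.length_cons, List.range'_succ,
      List.map_cons]
    have hcur : ((i0 : Int) + 1) ::
        pvRowB (c1.getD i0 ' ') (pvCell c1 c2 i0 0).1 ((i0 : Int) + 1)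
          ((List.range' 1 c2.length).map (fun j => (pvCell c1 c2 i0 j).1)) c2
        = (List.range (c2.length + 1)).map (fun j => (pvCell c1 c2 (i0 + 1) j).1) := by
      rw [hr, List.map_cons]
      have h0 : ((i0 : Int) + 1) = (pvCell c1 c2 (i0 + 1) 0).1 := by
        rw [pvCell_fst_zero]; push_cast; ring
      congr 1
      rw [h0]
      exact pvRowB_spec c1 c2 i0 c2 0 _ (pvDropZero c2) rfl
    rw [hcur]
    congr 1
    exact ih (i0 + 1) _ hrest.symm rfl

lemma getD_map_range {α : Type} (f : Nat → α) (N i : Nat) (d : α) (h : i < N) :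
    ((List.range N).map f).getD i d = f i := by
  simp [List.getD, h]

lemma getLastD_map_range {α : Type} (f : Nat → α) (N : Nat) (d : α) :
    ((List.range (N + 1)).map f).getLastD d = f N := by
  rw [List.range_succ, List.map_append]
  simp

lemma pvBackB_spec (c1 c2 : List Char) (dp : List (List Int))
    (H : ∀ i j, i ≤ c1.length → j ≤ c2.length →
      (dp.getD i []).getD j 0 = (pvCell c1 c2 i j).1) :
    ∀ i j, i ≤ c1.length → j ≤ c2.length →
      (pvBackB c1 c2 dp i j).reverse = (pvCell c1 c2 i j).2 := by
  suffices h : ∀ N i j, i + j = N → i ≤ c1.length → j ≤ c2.length →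
      (pvBackB c1 c2 dp i j).reverse = (pvCell c1 c2 i j).2 by
    intro i j hi hj; exact h (i + j) i j rfl hi hj
  intro N
  induction N using Nat.strong_induction_on with
  | _ N IH =>
  intro i j hN hi hj
  rw [pvBackB]
  by_cases h1 : i = 0 ∧ j = 0
  · obtain ⟨rfl, rfl⟩ := h1
    simp [pvCell]
  rw [if_neg h1]
  by_cases h2 : 0 < i ∧ 0 < j ∧ c1.getD (i - 1) ' ' = c2.getD (j - 1) ' '
  · rw [dif_pos h2]
    obtain ⟨hi0, hj0, hch⟩ := h2
    obtain ⟨i', rfl⟩ : ∃ i', i = i' + 1 := ⟨i - 1, by omega⟩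
    obtain ⟨j', rfl⟩ : ∃ j', j = j' + 1 := ⟨j - 1, by omega⟩
    simp only [Nat.add_sub_cancel] at hch ⊢
    rw [IH (i' + j') (by omega) i' j' rfl (by omega) (by omega)]
    rw [pvCell]
    unfold pvCellA
    rw [if_pos hch]
  rw [dif_neg h2]
  by_cases h3 : 0 < i ∧ (dp.getD i []).getD j 0 = (dp.getD (i - 1) []).getD j 0 + 1
  · rw [dif_pos h3]
    obtain ⟨hi0, hdp⟩ := h3
    obtain ⟨i', rfl⟩ : ∃ i', i = i' + 1 := ⟨i - 1, by omega⟩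
    simp only [Nat.add_sub_cancel] at hdp ⊢
    rw [H _ _ hi hj, H _ _ (by omega) hj] at hdp
    cases j with
    | zero =>
      rw [List.reverse_cons, IH i' (by omega) i' 0 rfl (by omega) (by omega)]
      conv_rhs => rw [pvCell]
    | succ j' =>
      have hne : ¬ c1.getD i' ' ' = c2.getD j' ' ' := by
        intro hc
        exact h2 ⟨by omega, by omega, by simpa using hc⟩
      have hfst : (pvCell c1 c2 (i' + 1) (j' + 1)).1
          = min ((pvCell c1 c2 i' (j' + 1)).1 + 1)
              (min ((pvCell c1 c2 (i' + 1) j').1 + 1) ((pvCell c1 c2 i' j').1 + 1)) := by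
        rw [pvCell, pvCellA_fst, if_neg hne]
      rw [List.reverse_cons, IH (i' + (j' + 1)) (by omega) i' (j' + 1) rfl (by omega) hj]
      conv_rhs => rw [pvCell]
      unfold pvCellA
      rw [if_neg hne, if_pos (hfst.symm.trans hdp)]
  rw [dif_neg h3]
  by_cases h4 : 0 < j ∧ (dp.getD i []).getD j 0 = (dp.getD i []).getD (j - 1) 0 + 1
  · rw [dif_pos h4]
    obtain ⟨hj0, hdp⟩ := h4
    obtain ⟨j', rfl⟩ : ∃ j', j = j' + 1 := ⟨j - 1, by omega⟩
    simp only [Nat.add_sub_cancel] at hdp ⊢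
    rw [H _ _ hi hj, H _ _ hi (by omega)] at hdp
    cases i with
    | zero =>
      rw [List.reverse_cons, IH j' (by omega) 0 j' (by omega) (by omega) (by omega)]
      conv_rhs => rw [pvCell]
    | succ i' =>
      simp only [Nat.add_sub_cancel] at h2 h3
      have hne : ¬ c1.getD i' ' ' = c2.getD j' ' ' := by
        intro hc
        exact h2 ⟨by omega, by omega, hc⟩
      have hfst : (pvCell c1 c2 (i' + 1) (j' + 1)).1
          = min ((pvCell c1 c2 i' (j' + 1)).1 + 1)
              (min ((pvCell c1 c2 (i' + 1) j').1 + 1) ((pvCell c1 c2 i' j').1 + 1)) := by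
        rw [pvCell, pvCellA_fst, if_neg hne]
      rw [H _ _ hi hj, H _ _ (by omega) hj] at h3
      have hd3 : ¬ min ((pvCell c1 c2 i' (j' + 1)).1 + 1)
          (min ((pvCell c1 c2 (i' + 1) j').1 + 1) ((pvCell c1 c2 i' j').1 + 1))
          = (pvCell c1 c2 i' (j' + 1)).1 + 1 := by
        intro hq
        exact h3 ⟨by omega, by rw [hfst]; exact hq⟩
      rw [List.reverse_cons, IH ((i' + 1) + j') (by omega) (i' + 1) j' rfl hi (by omega)]
      conv_rhs => rw [pvCell]
      unfold pvCellA
      rw [if_neg hne, if_neg hd3, if_pos (hfst.symm.trans hdp)]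
  rw [dif_neg h4]
  have hi0 : 0 < i := by
    rcases Nat.eq_zero_or_pos i with rfl | h
    · exfalso
      obtain ⟨j', rfl⟩ : ∃ j', j = j' + 1 := ⟨j - 1, by omega⟩
      apply h4
      refine ⟨by omega, ?_⟩
      simp only [Nat.add_sub_cancel]
      rw [H 0 (j' + 1) (by omega) hj, H 0 j' (by omega) (by omega),
        pvCell_zero_fst, pvCell_zero_fst]
      push_cast; ring
    · exact h
  have hj0 : 0 < j := by
    rcases Nat.eq_zero_or_pos j with rfl | h
    · exfalso
      obtain ⟨i', rfl⟩ : ∃ i', i = i' + 1 := ⟨i - 1, by omega⟩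
      apply h3
      refine ⟨by omega, ?_⟩
      simp only [Nat.add_sub_cancel]
      rw [H (i' + 1) 0 hi (by omega), H i' 0 (by omega) (by omega),
        pvCell_fst_zero, pvCell_fst_zero]
      push_cast; ring
    · exact h
  obtain ⟨i', rfl⟩ : ∃ i', i = i' + 1 := ⟨i - 1, by omega⟩
  obtain ⟨j', rfl⟩ : ∃ j', j = j' + 1 := ⟨j - 1, by omega⟩
  simp only [Nat.add_sub_cancel] at h2 h3 h4 ⊢
  have hne : ¬ c1.getD i' ' ' = c2.getD j' ' ' := by
    intro hc
    exact h2 ⟨by omega, by omega, hc⟩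
  have hfst : (pvCell c1 c2 (i' + 1) (j' + 1)).1
      = min ((pvCell c1 c2 i' (j' + 1)).1 + 1)
          (min ((pvCell c1 c2 (i' + 1) j').1 + 1) ((pvCell c1 c2 i' j').1 + 1)) := by
    rw [pvCell, pvCellA_fst, if_neg hne]
  rw [H _ _ hi hj, H _ _ (by omega) hj] at h3
  rw [H _ _ hi hj, H _ _ hi (by omega)] at h4
  have hd3 : ¬ min ((pvCell c1 c2 i' (j' + 1)).1 + 1)
      (min ((pvCell c1 c2 (i' + 1) j').1 + 1) ((pvCell c1 c2 i' j').1 + 1))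
      = (pvCell c1 c2 i' (j' + 1)).1 + 1 := by
    intro hq
    exact h3 ⟨by omega, by rw [hfst]; exact hq⟩
  have hd4 : ¬ min ((pvCell c1 c2 i' (j' + 1)).1 + 1)
      (min ((pvCell c1 c2 (i' + 1) j').1 + 1) ((pvCell c1 c2 i' j').1 + 1))
      = (pvCell c1 c2 (i' + 1) j').1 + 1 := by
    intro hq
    exact h4 ⟨by omega, by rw [hfst]; exact hq⟩
  rw [List.reverse_cons, IH (i' + j') (by omega) i' j' rfl (by omega) (by omega)]
  conv_rhs => rw [pvCell]
  unfold pvCellA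
  rw [if_neg hne, if_neg hd3, if_neg hd4]

-- ===== VERDICT (by name: the statement is the Claim_ definition above) =====
theorem levenshtein_distance_with_path_spec : Claim_equal_levenshtein_distance_with_path := by
  intro s1 s2 _
  unfold Spec_levenshtein_distance_with_path
  simp only [levenshtein_distance_with_path, levenshtein_distance_with_path_alt]
  generalize s1.toList = c1
  generalize s2.toList = c2
  have hrow0A : ((0 : Int), ([] : List String)) :: pvInitRowA c2 0 []
      = (List.range (c2.length + 1)).map (pvCell c1 c2 0) := by
    rw [List.range_eq_range', List.range'_succ, List.map_cons]
    congr 1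
    · rw [pvCell]
    · have := pvInitRowA_spec c1 c2 c2 0 (pvDropZero c2)
      simpa [pvCell] using this
  have hA : pvOuterA (((0 : Int), ([] : List String)) :: pvInitRowA c2 0 []) c1 c2 0
      = (List.range (c2.length + 1)).map (pvCell c1 c2 c1.length) := by
    rw [hrow0A, pvOuterA_spec c1 c2 c1 0 _ (pvDropZero c1) rfl]
    simp
  have hrow0B : (List.range (c2.length + 1)).map (fun k : Nat => (k : Int))
      = (List.range (c2.length + 1)).map (fun j => (pvCell c1 c2 0 j).1) := by
    apply List.map_congr_left
    intro j _
    exact (pvCell_zero_fst c1 c2 j).symm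
  have hdp : ((List.range (c2.length + 1)).map (fun k : Nat => (k : Int)))
        :: pvRowsB ((List.range (c2.length + 1)).map (fun k : Nat => (k : Int))) c1 c2 0
      = (List.range (c1.length + 1)).map
          (fun i => (List.range (c2.length + 1)).map (fun j => (pvCell c1 c2 i j).1)) := by
    rw [show List.range (c1.length + 1) = 0 :: List.range' 1 c1.length from by
      rw [List.range_eq_range', List.range'_succ], List.map_cons]
    rw [hrow0B]
    congr 1
    have := pvRowsB_spec c1 c2 c1 0 _ (pvDropZero c1) rfl
    simpa using this
  have Hacc : ∀ i j, i ≤ c1.length → j ≤ c2.length →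
      ((((List.range (c2.length + 1)).map (fun k : Nat => (k : Int)))
        :: pvRowsB ((List.range (c2.length + 1)).map (fun k : Nat => (k : Int))) c1 c2 0).getD i
          []).getD j 0 = (pvCell c1 c2 i j).1 := by
    intro i j hi hj
    rw [hdp, getD_map_range _ _ _ _ (by omega), getD_map_range _ _ _ _ (by omega)]
  rw [hA, getLastD_map_range, Hacc _ _ le_rfl le_rfl,
    pvBackB_spec c1 c2 _ Hacc c1.length c2.length le_rfl le_rfl]
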